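-- pv_equiv track=rewrite | github.com/anduckhmt146/leetcode-practice | 2055-describe-the-painting/2055-describe-the-painting.py | splitPainting
-- ===== SOURCE A (Python) =====
-- from typing import List
-- from collections import defaultdict
--
-- def splitPainting(segments: List[List[int]]) -> List[List[int]]:
--     changes = defaultdict(int)
--
--     # Record color increments and decrements at segment boundaries
--     for start, end, color in segments:
--         changes[start] += color
--         changes[end] -= color
--
--     points = sorted(changes.keys())
--
--     result = []
--     curr_color = 0
--     prev_point = points[0]
--
--     for i in range(len(points)):
--         point = points[i]
--
--         if i > 0 and curr_color > 0:
--             # Create segment from prev_point to current point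
--             result.append([prev_point, point, curr_color])
--
--         # Update curr_color after recording the segment
--         curr_color += changes[point]
--         prev_point = point
--
--     return result
-- ===== SOURCE B (Python) =====
-- def splitPainting(segments):
--     # Distinct boundary coordinates, in order.
--     pts = sorted({p for s, e, _ in segments for p in (s, e)})
--     out = []
--     for p, q in zip(pts, pts[1:]):
--         # Net color on [p, q): segments already started minus segments already ended.
--         color = (sum(c for s, _, c in segments if s <= p)
--                  - sum(c for _, e, c in segments if e <= p))
--         if color > 0:
--             out.append([p, q, color])
--     return out
-- ===== Notes on version B (the rewrite author's own statement) =====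
-- stated objective: alternative
-- what changed: Replaces A's defaultdict difference-map plus running prefix-sum sweep by a direct per-interval scan: for each adjacent pair of sorted distinct boundary coordinates, the net color is recomputed from scratch as (sum of colors of segments already started) minus (sum of colors of segments already ended).
import Mathlib
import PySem

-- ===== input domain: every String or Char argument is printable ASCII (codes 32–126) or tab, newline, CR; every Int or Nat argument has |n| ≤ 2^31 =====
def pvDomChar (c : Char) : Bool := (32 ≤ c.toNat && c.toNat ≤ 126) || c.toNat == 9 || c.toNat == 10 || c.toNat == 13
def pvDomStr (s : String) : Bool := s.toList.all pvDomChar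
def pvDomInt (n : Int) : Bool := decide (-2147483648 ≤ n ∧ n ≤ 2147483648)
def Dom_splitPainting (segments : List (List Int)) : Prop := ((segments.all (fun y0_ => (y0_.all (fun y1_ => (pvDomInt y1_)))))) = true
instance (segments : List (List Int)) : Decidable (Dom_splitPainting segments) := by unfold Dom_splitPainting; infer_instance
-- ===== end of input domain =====

-- B replaces A's difference-map sweep by a direct per-interval scan over the sorted distinct
-- boundaries (objective: alternative decomposition, not faster).


-- ===== PORT A =====
-- loop body 'changes[start] += color; changes[end] -= color' on a defaultdict(int); rows that
-- are not 3-element lists make Python's unpacking raise (excluded by Pre_), the catch-all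
-- leaves the dict unchanged there.
def pvStep (d : PySem.Dict Int Int) (seg : List Int) : PySem.Dict Int Int :=
  match seg with
  | [s, e, c] => (d.modify s 0 (· + c)).modify e 0 (fun v => v - c)
  | _ => d

def splitPainting (segments : List (List Int)) : List (List Int) :=
  let changes := segments.foldl pvStep PySem.Dict.empty
  let points := PySem.List.sorted changes.keys (fun x => x)
  -- 'prev_point = points[0]' raises IndexError on empty input (excluded by Pre_): headD 0 there
  let final := (PySem.List.pyRange 0 (PySem.List.len points)).foldl
    (fun (st : List (List Int) × Int × Int) i =>
      let point := PySem.List.pyGetD points i 0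
      let res := if 0 < i ∧ 0 < st.2.1 then st.1 ++ [[st.2.2, point, st.2.1]] else st.1
      (res, st.2.1 + changes.getD point 0, point))
    ([], 0, points.headD 0)
  final.1

-- ===== PORT B =====
-- '{p for s, e, _ in segments for p in (s, e)}' (rows that are not triples raise in Python;
-- excluded by Pre_, the catch-all contributes nothing there)
def pvBounds (segments : List (List Int)) : List Int :=
  segments.flatMap (fun seg => match seg with | [s, e, _] => [s, e] | _ => [])

def splitPainting_alt (segments : List (List Int)) : List (List Int) :=
  let pts := PySem.List.sorted (PySem.Set.ofList (pvBounds segments)) (fun x => x)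
  (pts.zip pts.tail).foldl (fun out pq =>
    let color : Int :=
      (segments.map (fun seg => match seg with | [s, _, c] => if s ≤ pq.1 then c else 0 | _ => 0)).sum
      - (segments.map (fun seg => match seg with | [_, e, c] => if e ≤ pq.1 then c else 0 | _ => 0)).sum
    if 0 < color then out ++ [[pq.1, pq.2, color]] else out) []

-- ===== PRECONDITION & SPEC =====
-- Pre_ excludes exactly the inputs on which Python A raises: the empty list (IndexError at
-- points[0]) and rows that are not 3-element lists (ValueError at tuple unpacking).
def Pre_splitPainting (segments : List (List Int)) : Prop :=
  segments ≠ [] ∧ ∀ seg ∈ segments, seg.length = 3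
instance (segments : List (List Int)) : Decidable (Pre_splitPainting segments) := by
  unfold Pre_splitPainting; infer_instance

def pvWitness_splitPainting : List (List Int) := [[1, 4, 5], [4, 7, 7], [1, 7, 9]]

def Spec_splitPainting (segments : List (List Int)) (out : List (List Int)) : Prop := out = splitPainting_alt segments
instance (segments : List (List Int)) (out : List (List Int)) : Decidable (Spec_splitPainting segments out) := by unfold Spec_splitPainting; infer_instance

-- ===== CLAIM (what is proved, stated in full; the proofs are below) =====
def Claim_equal_splitPainting : Prop := ∀ (segments : List (List Int)), Dom_splitPainting segments → Pre_splitPainting segments → Spec_splitPainting segments (splitPainting segments)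

-- ===== LEMMAS AND PROOFS =====

-- net change one row contributes at coordinate x (what A's dict stores at x)
def pvDAt (x : Int) (seg : List Int) : Int :=
  match seg with
  | [s, e, c] => (if x = s then c else 0) - (if x = e then c else 0)
  | _ => 0

-- cumulative color just after coordinate p (what B computes per interval)
def pvCAt (segments : List (List Int)) (p : Int) : Int :=
  (segments.map (fun seg => match seg with
    | [s, e, c] => (if s ≤ p then c else 0) - (if e ≤ p then c else 0)
    | _ => 0)).sum

lemma pvKeys_modify (d : PySem.Dict Int Int) (k : Int) (d0 : Int) (f : Int → Int) :
    (d.modify k d0 f).keys = PySem.Set.add d.keys k := by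
  rw [PySem.Dict.keys_modify]
  by_cases h : d.contains k = true
  · rw [PySem.Dict.keys_insert_of_contains _ _ h]
    have hm : k ∈ d.keys := (PySem.Dict.contains_iff_mem_keys d k).mp h
    simp [PySem.Set.add, hm]
  · rw [PySem.Dict.keys_insert_of_not_contains _ _ (by simpa using h)]
    have hm : ¬ (k ∈ d.keys) := fun hm => h ((PySem.Dict.contains_iff_mem_keys d k).mpr hm)
    simp [PySem.Set.add, hm]

lemma pvKeys_foldl (segs : List (List Int)) (d : PySem.Dict Int Int) :
    (segs.foldl pvStep d).keys = PySem.Set.update d.keys (pvBounds segs) := by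
  induction segs generalizing d with
  | nil => simp [pvBounds, PySem.Set.update]
  | cons seg rest ih =>
    rcases seg with _ | ⟨s, _ | ⟨e, _ | ⟨c, _ | ⟨x, t⟩⟩⟩⟩ <;>
      simp only [List.foldl_cons, pvStep] <;>
      rw [ih] <;>
      [skip; skip; skip; rw [pvKeys_modify, pvKeys_modify]; skip] <;>
      simp [pvBounds, PySem.Set.update]

lemma pvGetD_foldl (segs : List (List Int)) (d : PySem.Dict Int Int) (x : Int) :
    (segs.foldl pvStep d).getD x 0 = d.getD x 0 + (segs.map (pvDAt x)).sum := by
  induction segs generalizing d with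
  | nil => simp
  | cons seg rest ih =>
    rcases seg with _ | ⟨s, _ | ⟨e, _ | ⟨c, _ | ⟨y, t⟩⟩⟩⟩ <;>
      simp only [List.foldl_cons, pvStep, List.map_cons, List.sum_cons, pvDAt] <;>
      rw [ih] <;> simp [PySem.Dict.getD_modify] <;> split_ifs <;> subst_vars <;>
      (try (exact absurd rfl (by assumption))) <;> ring

lemma pvC_succ (segs : List (List Int)) (hlen : ∀ seg ∈ segs, seg.length = 3)
    (p q : Int) (hpq : p < q) (hb : ∀ b ∈ pvBounds segs, b ≤ p ∨ q ≤ b) :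
    pvCAt segs q = pvCAt segs p + (segs.map (pvDAt q)).sum := by
  unfold pvCAt
  rw [← PySem.List.sum_map_add_int]
  refine congrArg List.sum (List.map_congr_left ?_)
  intro seg hseg
  have hl := hlen seg hseg
  rcases seg with _ | ⟨s, _ | ⟨e, _ | ⟨c, _ | ⟨y, t⟩⟩⟩⟩ <;> simp at hl
  have hs : s ∈ pvBounds segs := List.mem_flatMap.mpr ⟨[s, e, c], hseg, by simp⟩
  have he : e ∈ pvBounds segs := List.mem_flatMap.mpr ⟨[s, e, c], hseg, by simp⟩
  have key : ∀ b, (b ≤ p ∨ q ≤ b) →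
      (if b ≤ q then c else 0) = (if b ≤ p then c else 0) + (if q = b then c else 0) := by
    intro b h
    rcases h with h | h <;> split_ifs <;> omega
  simp only [pvDAt]
  rw [key s (hb s hs), key e (hb e he)]
  ring

lemma pvC_head (segs : List (List Int)) (hlen : ∀ seg ∈ segs, seg.length = 3)
    (q : Int) (hb : ∀ b ∈ pvBounds segs, q ≤ b) :
    pvCAt segs q = (segs.map (pvDAt q)).sum := by
  unfold pvCAt
  refine congrArg List.sum (List.map_congr_left ?_)
  intro seg hseg
  have hl := hlen seg hseg
  rcases seg with _ | ⟨s, _ | ⟨e, _ | ⟨c, _ | ⟨y, t⟩⟩⟩⟩ <;> simp at hl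
  have hs : s ∈ pvBounds segs := List.mem_flatMap.mpr ⟨[s, e, c], hseg, by simp⟩
  have he : e ∈ pvBounds segs := List.mem_flatMap.mpr ⟨[s, e, c], hseg, by simp⟩
  have key : ∀ b, q ≤ b → (if b ≤ q then c else 0) = (if q = b then c else 0) := by
    intro b h; split_ifs <;> omega
  simp only [pvDAt]
  rw [key s (hb s hs), key e (hb e he)]

lemma pvC_sub (segs : List (List Int)) (p : Int) :
    pvCAt segs p
      = (segs.map (fun seg => match seg with | [s, _, c] => if s ≤ p then c else 0 | _ => 0)).sum
      - (segs.map (fun seg => match seg with | [_, e, c] => if e ≤ p then c else 0 | _ => 0)).sum := by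
  unfold pvCAt
  rw [sub_eq_add_neg, List.sum_neg, List.map_map, ← PySem.List.sum_map_add_int]
  refine congrArg List.sum (List.map_congr_left ?_)
  intro seg _
  rcases seg with _ | ⟨s, _ | ⟨e, _ | ⟨c, _ | ⟨y, t⟩⟩⟩⟩ <;> simp [Function.comp] <;> ring

lemma pvLoop (segs : List (List Int)) (G : Int → Int)
    (hG : ∀ x, G x = (segs.map (pvDAt x)).sum)
    (hlen : ∀ seg ∈ segs, seg.length = 3) :
    ∀ (t : List Int) (p : Int) (res : List (List Int)),
    List.Pairwise (· < ·) (p :: t) →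
    (∀ b ∈ pvBounds segs, b ≤ p ∨ b ∈ t) →
    (t.foldl (fun (st : List (List Int) × Int × Int) q =>
        (if 0 < st.2.1 then st.1 ++ [[st.2.2, q, st.2.1]] else st.1, st.2.1 + G q, q))
      (res, pvCAt segs p, p)).1
    = ((p :: t).zip t).foldl (fun out pq =>
        if 0 < pvCAt segs pq.1 then out ++ [[pq.1, pq.2, pvCAt segs pq.1]] else out) res := by
  intro t
  induction t with
  | nil => intro p res _ _; simp
  | cons q t' ih =>
    intro p res hpw hb
    have hpq : p < q := (List.pairwise_cons.mp hpw).1 q (by simp)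
    have hadj : ∀ b ∈ pvBounds segs, b ≤ p ∨ q ≤ b := by
      intro b hbb
      rcases hb b hbb with h | h
      · exact Or.inl h
      · rcases List.mem_cons.mp h with rfl | h
        · exact Or.inr le_rfl
        · exact Or.inr (le_of_lt (((List.pairwise_cons.mp (List.pairwise_cons.mp hpw).2).1) b h))
    have hstep : pvCAt segs p + G q = pvCAt segs q := by
      rw [hG q, ← pvC_succ segs hlen p q hpq hadj]
    have hb' : ∀ b ∈ pvBounds segs, b ≤ q ∨ b ∈ t' := by
      intro b hbb
      rcases hb b hbb with h | h
      · exact Or.inl (le_of_lt (lt_of_le_of_lt h hpq))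
      · rcases List.mem_cons.mp h with rfl | h
        · exact Or.inl le_rfl
        · exact Or.inr h
    simp only [List.foldl_cons, List.zip_cons_cons]
    rw [hstep]
    exact ih q (if 0 < pvCAt segs p then res ++ [[p, q, pvCAt segs p]] else res)
      (List.pairwise_cons.mp hpw).2 hb'

lemma pvAloop (changes : PySem.Dict Int Int) (p₀ : Int) (rest : List Int) :
    List.foldl (fun (st : List (List Int) × Int × Int) i =>
        (if 0 < i ∧ 0 < st.2.1 then st.1 ++ [[st.2.2, PySem.List.pyGetD (p₀ :: rest) i 0, st.2.1]] else st.1,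
         st.2.1 + changes.getD (PySem.List.pyGetD (p₀ :: rest) i 0) 0, PySem.List.pyGetD (p₀ :: rest) i 0))
      ([], 0, (p₀ :: rest).headD 0)
      (PySem.List.pyRange 0 (PySem.List.len (p₀ :: rest)))
    = List.foldl (fun (st : List (List Int) × Int × Int) q =>
        (if 0 < st.2.1 then st.1 ++ [[st.2.2, q, st.2.1]] else st.1, st.2.1 + changes.getD q 0, q))
      ([], 0 + changes.getD p₀ 0, p₀) rest := by
  have h0 : (0 : Int) < PySem.List.len (p₀ :: rest) := by
    simp [PySem.List.len]
  rw [PySem.List.pyRange_one_cons h0, List.foldl_cons]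
  simp only [PySem.List.pyGetD_ofNat', List.getD_cons_zero, List.headD_cons,
    lt_self_iff_false, false_and, if_false, zero_add]
  rw [PySem.List.foldl_congr_mem (PySem.List.pyRange 1 (PySem.List.len (p₀ :: rest))) _
    (fun (st : List (List Int) × Int × Int) i =>
      (fun (st : List (List Int) × Int × Int) (q : Int) =>
        (if 0 < st.2.1 then st.1 ++ [[st.2.2, q, st.2.1]] else st.1, st.2.1 + changes.getD q 0, q))
      st (PySem.List.pyGetD (p₀ :: rest) i 0)) _
    (by
      intro acc i hi
      have h1 : (0 : Int) < i := by
        have := (PySem.List.mem_pyRange_one.mp hi).1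
        omega
      simp [h1])]
  rw [PySem.List.foldl_pyRange_pyGetD (p₀ :: rest) 0
    (fun (st : List (List Int) × Int × Int) (q : Int) =>
      (if 0 < st.2.1 then st.1 ++ [[st.2.2, q, st.2.1]] else st.1, st.2.1 + changes.getD q 0, q))
    ([], changes.getD p₀ 0, p₀) (by norm_num : (0:Int) ≤ 1)]
  simp

-- ===== VERDICT =====
theorem splitPainting_spec : Claim_equal_splitPainting := by
  intro segs _ hpre
  obtain ⟨hne, hlen⟩ := hpre
  unfold Spec_splitPainting
  simp only [splitPainting, splitPainting_alt]
  rw [pvKeys_foldl, PySem.Dict.keys_empty,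
    (by rfl : PySem.Set.update ([] : List Int) (pvBounds segs) = PySem.Set.ofList (pvBounds segs))]
  set pts := PySem.List.sorted (PySem.Set.ofList (pvBounds segs)) (fun x => x) with hptsdef
  have hbne : pvBounds segs ≠ [] := by
    rcases segs with _ | ⟨seg, rest⟩
    · exact absurd rfl hne
    · have hl := hlen seg (by simp)
      rcases seg with _ | ⟨s, _ | ⟨e, _ | ⟨c, _ | ⟨y, t⟩⟩⟩⟩ <;> simp at hl <;> simp [pvBounds]
  have hptsne : pts ≠ [] := by
    intro h
    rw [hptsdef, PySem.List.sorted_eq_nil_iff] at h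
    rcases List.exists_cons_of_ne_nil hbne with ⟨b, bs, hb⟩
    have hbm : b ∈ PySem.Set.ofList (pvBounds segs) :=
      (PySem.Set.mem_ofList _ _).mpr (by rw [hb]; simp)
    rw [h] at hbm
    simp at hbm
  obtain ⟨p₀, rest, hpts⟩ := List.exists_cons_of_ne_nil hptsne
  have hperm := PySem.List.sorted_perm (PySem.Set.ofList (pvBounds segs)) (fun x => x) false
  have hnodup : pts.Nodup := hperm.nodup_iff.mpr (PySem.Set.nodup_ofList _)
  have hmem : ∀ b ∈ pvBounds segs, b ∈ pts := fun b h =>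
    hperm.mem_iff.mpr ((PySem.Set.mem_ofList _ _).mpr h)
  have hle := PySem.List.sorted_pairwise (PySem.Set.ofList (pvBounds segs)) (fun x => x)
  have hlt : List.Pairwise (· < ·) pts :=
    (hle.and hnodup).imp (fun h => lt_of_le_of_ne h.1 h.2)
  have hG : ∀ x, (segs.foldl pvStep PySem.Dict.empty).getD x 0 = (segs.map (pvDAt x)).sum := by
    intro x; rw [pvGetD_foldl]; simp
  have hmin : ∀ b ∈ pvBounds segs, p₀ ≤ b := by
    intro b h
    have hbp := hmem b h
    rw [hpts] at hbp hlt
    rcases List.mem_cons.mp hbp with rfl | hbp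
    · exact le_rfl
    · exact le_of_lt ((List.pairwise_cons.mp hlt).1 b hbp)
  have hb0 : ∀ b ∈ pvBounds segs, b ≤ p₀ ∨ b ∈ rest := by
    intro b h
    have hbp := hmem b h
    rw [hpts] at hbp
    rcases List.mem_cons.mp hbp with rfl | hbp
    · exact Or.inl le_rfl
    · exact Or.inr hbp
  rw [hpts, pvAloop, zero_add, hG p₀, ← pvC_head segs hlen p₀ hmin, List.tail_cons]
  rw [hpts] at hlt
  rw [pvLoop segs _ hG hlen rest p₀ [] hlt hb0]
  exact (PySem.List.foldl_congr_mem _ _ _ _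
    (by intro acc pq _; rw [← pvC_sub segs pq.1])).symm
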